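-- pv_equiv track=rewrite | github.com/YR-U65/ppp_2025 | ppp2025_task10_file3/weather_select.py | get_rainfalls
-- ===== SOURCE A (Python) =====
-- def get_rainfalls(rainfalls):
--     count = 0
--
--     count_list = []
--     for rain in rainfalls:
--         if rain > 0:
--             count += rain
--         else :
--             if count > 0:
--                 count_list.append(count)
--                 count = 0
--     if count > 0 :
--         count_list.append(count)
--     return count_list
-- ===== SOURCE B (Python) =====
-- def get_rainfalls(rainfalls):
--     # group-then-reduce: scan each maximal run of positive values and sum it
--     res = []
--     i, n = 0, len(rainfalls)
--     while i < n:
--         if rainfalls[i] > 0: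
--             j = i
--             while j < n and rainfalls[j] > 0:
--                 j += 1
--             res.append(sum(rainfalls[i:j]))
--             i = j
--         else:
--             i += 1
--     return res
-- ===== Notes on version B (the rewrite author's own statement) =====
-- stated objective: alternative
-- what changed: Replaces the running-accumulator-with-final-flush loop by a group-then-reduce scan: each maximal run of positive values is located and summed as a slice, with no pending counter or flush logic.
import Mathlib
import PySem

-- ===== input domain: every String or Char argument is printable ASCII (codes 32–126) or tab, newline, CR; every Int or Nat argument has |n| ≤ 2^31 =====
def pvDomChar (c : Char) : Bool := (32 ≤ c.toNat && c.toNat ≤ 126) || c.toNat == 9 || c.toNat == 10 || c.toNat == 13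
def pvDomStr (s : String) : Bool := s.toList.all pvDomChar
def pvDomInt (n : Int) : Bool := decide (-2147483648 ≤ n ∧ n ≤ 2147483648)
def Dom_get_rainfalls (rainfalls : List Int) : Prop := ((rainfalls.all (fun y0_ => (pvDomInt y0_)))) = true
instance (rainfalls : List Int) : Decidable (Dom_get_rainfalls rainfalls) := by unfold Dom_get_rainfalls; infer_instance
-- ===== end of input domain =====

-- B replaces A's running-accumulator-with-flush loop by a group-then-reduce scan (same O(n) cost).


-- ===== PORT A =====
-- fold over the list with state (count, count_list), then the final flush
def get_rainfalls (rainfalls : List Int) : List Int :=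
  let s := rainfalls.foldl
    (fun (st : Int × List Int) rain =>
      if rain > 0 then (st.1 + rain, st.2)
      else if st.1 > 0 then (0, st.2 ++ [st.1]) else st)
    (0, [])
  if s.1 > 0 then s.2 ++ [s.1] else s.2

-- ===== PORT B =====
-- the inner while-scan over a positive run is takeWhile/dropWhile; the slice sum is List.sum
def altGo (xs : List Int) : List Int :=
  match xs with
  | [] => []
  | x :: rest =>
    if x > 0 then
      (x :: rest.takeWhile (fun r => r > 0)).sum ::
        altGo (rest.dropWhile (fun r => r > 0))
    else altGo rest
termination_by xs.length
decreasing_by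
  · exact Nat.lt_succ_of_le (List.length_dropWhile_le _ _)
  · simp

def get_rainfalls_alt (rainfalls : List Int) : List Int := altGo rainfalls

-- ===== PRECONDITION & SPEC =====
def Spec_get_rainfalls (rainfalls : List Int) (out : List Int) : Prop := out = get_rainfalls_alt rainfalls
instance (rainfalls : List Int) (out : List Int) : Decidable (Spec_get_rainfalls rainfalls out) := by unfold Spec_get_rainfalls; infer_instance

-- ===== CLAIM (what is proved, stated in full; the proofs are below) =====
def Claim_equal_get_rainfalls : Prop := ∀ (rainfalls : List Int), Dom_get_rainfalls rainfalls → Spec_get_rainfalls rainfalls (get_rainfalls rainfalls)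

-- ===== LEMMAS AND PROOFS =====

-- A's step function, named for the proofs
def aStep (st : Int × List Int) (rain : Int) : Int × List Int :=
  if rain > 0 then (st.1 + rain, st.2)
  else if st.1 > 0 then (0, st.2 ++ [st.1]) else st

-- A's fold+flush with a pending count c, acc factored out
def gA (c : Int) (xs : List Int) : List Int :=
  match xs with
  | [] => if c > 0 then [c] else []
  | x :: rest =>
    if x > 0 then gA (c + x) rest
    else if c > 0 then c :: gA 0 rest else gA c rest

lemma foldl_flush (xs : List Int) : ∀ (c : Int) (acc : List Int),
    (let s := xs.foldl aStep (c, acc); if s.1 > 0 then s.2 ++ [s.1] else s.2)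
      = acc ++ gA c xs := by
  induction xs with
  | nil => intro c acc; simp [gA]; split <;> simp
  | cons x rest ih =>
    intro c acc
    simp only [List.foldl_cons, gA, aStep]
    by_cases hx : x > 0
    · simp [hx, ih]
    · by_cases hc : c > 0
      · simp [hx, hc, ih]
      · simp [hx, hc, ih]

lemma gA_eq_altGo (xs : List Int) : ∀ (c : Int), 0 ≤ c →
    gA c xs = if c > 0
      then (c + (xs.takeWhile (fun r => r > 0)).sum) :: altGo (xs.dropWhile (fun r => r > 0))
      else altGo xs := by
  induction xs with
  | nil => intro c _; simp [gA, altGo]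
  | cons x rest ih =>
    intro c hc
    by_cases hx : x > 0
    · rw [gA]
      simp only [hx, if_pos, List.takeWhile_cons, List.dropWhile_cons]
      have h1 : (0:Int) ≤ c + x := by omega
      rw [ih (c + x) h1]
      have hcx : c + x > 0 := by omega
      by_cases hc0 : c > 0
      · simp [hcx, hc0]; ring
      · have : c = 0 := by omega
        subst this
        simp [altGo, hx]
    · rw [gA]
      simp only [hx, ite_false]
      by_cases hc0 : c > 0
      · rw [ih 0 le_rfl]
        simp [hc0, altGo, hx]
      · have : c = 0 := by omega
        subst this
        rw [ih 0 le_rfl]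
        simp [altGo, hx]

-- ===== VERDICT (by name: the statement is the Claim_ definition above) =====
theorem get_rainfalls_spec : Claim_equal_get_rainfalls := by
  intro rainfalls _
  show get_rainfalls rainfalls = get_rainfalls_alt rainfalls
  have h := foldl_flush rainfalls 0 []
  simp only [List.nil_append] at h
  rw [gA_eq_altGo rainfalls 0 le_rfl] at h
  simpa [get_rainfalls, get_rainfalls_alt, aStep] using h
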